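-- pv_equiv track=rewrite | github.com/btrif/Python_dev_repo | Project EULER/pb215 Crack-free Walls.py | row_gen
-- ===== SOURCE A (Python) =====
-- def row_gen(w, current):
--     if w == 1:
--         return
--     elif w < 4:
--         yield (current << w)
--         return
--
--     for r in row_gen(w-2, (current << 2) | 1):
--         yield r
--
--     for r in row_gen(w-3, (current << 3) | 1):
--         yield r
-- ===== SOURCE B (Python) =====
-- def row_gen(w, current):
--     # Explicit-stack DFS instead of recursion; children pushed 3-branch first
--     # so the 2-branch is processed first, preserving the original yield order.
--     stack = [(w, current)]
--     while stack:
--         w0, c = stack.pop()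
--         if w0 == 1:
--             continue
--         if w0 < 4:
--             yield c << w0
--             continue
--         stack.append((w0 - 3, (c << 3) | 1))
--         stack.append((w0 - 2, (c << 2) | 1))
-- ===== Notes on version B (the rewrite author's own statement) =====
-- stated objective: alternative
-- what changed: Replaced the recursive generator with an iterative explicit-stack DFS that pushes the 3-brick child before the 2-brick child so the LIFO pop order reproduces the original preorder yield sequence.
import Mathlib
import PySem

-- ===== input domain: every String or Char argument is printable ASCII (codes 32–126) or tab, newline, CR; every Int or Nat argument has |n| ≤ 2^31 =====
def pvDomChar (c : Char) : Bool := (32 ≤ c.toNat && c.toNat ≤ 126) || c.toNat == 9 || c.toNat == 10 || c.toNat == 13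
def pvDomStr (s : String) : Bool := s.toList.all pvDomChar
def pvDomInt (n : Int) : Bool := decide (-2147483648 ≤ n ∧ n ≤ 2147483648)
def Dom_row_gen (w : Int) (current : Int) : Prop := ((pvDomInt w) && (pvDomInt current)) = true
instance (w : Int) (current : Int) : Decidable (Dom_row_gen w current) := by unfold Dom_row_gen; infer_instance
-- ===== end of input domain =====

-- B replaces the recursion by an explicit-stack iterative DFS (alternative decomposition, same cost).

-- ===== PORT A =====
-- Literal port of the recursive generator; yields collected into a list.
def row_gen (w : Int) (current : Int) : List Int :=
  if w = 1 then []
  else if w < 4 then [current <<< w.toNat]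
  else row_gen (w - 2) (PySem.Int.bor (current <<< (2:Nat)) 1) ++ row_gen (w - 3) (PySem.Int.bor (current <<< (3:Nat)) 1)
termination_by w.toNat
decreasing_by all_goals (simp; omega)

-- ===== PORT B =====
-- The while-loop over the explicit stack; acc accumulates the yields in order.
def row_gen_altLoop (stack : List (Int × Int)) (acc : List Int) : List Int :=
  match stack with
  | [] => acc
  | (w0, c) :: rest =>
    if w0 = 1 then row_gen_altLoop rest acc
    else if w0 < 4 then row_gen_altLoop rest (acc ++ [c <<< w0.toNat])
    else row_gen_altLoop ((w0 - 2, PySem.Int.bor (c <<< (2:Nat)) 1) :: (w0 - 3, PySem.Int.bor (c <<< (3:Nat)) 1) :: rest) acc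
termination_by (stack.map (fun p => 3 ^ p.1.toNat)).sum
decreasing_by
  · simp
  · simp
  · simp only [List.map_cons, List.sum_cons]
    have h4 : 4 ≤ w0.toNat := by omega
    have e2 : (w0 - 2).toNat = w0.toNat - 2 := by omega
    have e3 : (w0 - 3).toNat = w0.toNat - 3 := by omega
    rw [e2, e3]
    have : 3 ^ (w0.toNat - 2) + 3 ^ (w0.toNat - 3) < 3 ^ w0.toNat := by
      have : 3 ^ (w0.toNat - 2) + 3 ^ (w0.toNat - 3) = 4 * 3 ^ (w0.toNat - 3) := by
        have : w0.toNat - 2 = (w0.toNat - 3) + 1 := by omega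
        rw [this]; ring
      rw [this]
      calc 4 * 3 ^ (w0.toNat - 3) < 3 ^ 3 * 3 ^ (w0.toNat - 3) := by
             have := Nat.one_le_two_pow (n := w0.toNat - 3)
             have : 0 < 3 ^ (w0.toNat - 3) := Nat.pow_pos (by norm_num)
             omega
           _ = 3 ^ (3 + (w0.toNat - 3)) := by rw [pow_add]
           _ = 3 ^ w0.toNat := by congr 1; omega
    omega

def row_gen_alt (w : Int) (current : Int) : List Int :=
  row_gen_altLoop [(w, current)] []

-- ===== PRECONDITION & SPEC =====
-- Python A raises ValueError ("negative shift count") when w < 0 (and w ≠ 1 is then automatic); Pre_ excludes exactly those.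
def Pre_row_gen (w : Int) (current : Int) : Prop := 0 ≤ w
instance (w : Int) (current : Int) : Decidable (Pre_row_gen w current) := by unfold Pre_row_gen; infer_instance
def pvWitness_row_gen : Int × Int := (9, 0)

def Spec_row_gen (w : Int) (current : Int) (out : List Int) : Prop := out = row_gen_alt w current
instance (w : Int) (current : Int) (out : List Int) : Decidable (Spec_row_gen w current out) := by unfold Spec_row_gen; infer_instance

-- ===== CLAIM (what is proved, stated in full; the proofs are below) =====
def Claim_equal_row_gen : Prop := ∀ (w : Int) (current : Int), Dom_row_gen w current → Pre_row_gen w current → Spec_row_gen w current (row_gen w current)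

-- ===== LEMMAS AND PROOFS =====

-- Loop invariant: the stack loop computes acc ++ the concatenation of A's results over the pending frames.
theorem row_gen_altLoop_spec (stack : List (Int × Int)) (acc : List Int) :
    row_gen_altLoop stack acc = acc ++ (stack.map (fun p => row_gen p.1 p.2)).flatten := by
  induction stack, acc using row_gen_altLoop.induct with
  | case1 acc => simp [row_gen_altLoop]
  | case2 acc c rest ih =>
      rw [row_gen_altLoop, ih]
      have h : row_gen 1 c = [] := by rw [row_gen.eq_def]; simp
      simp [h]
  | case3 acc w0 c rest h1 h2 ih =>
      rw [row_gen_altLoop, if_neg h1, if_pos h2, ih]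
      have h : row_gen w0 c = [c <<< w0.toNat] := by rw [row_gen.eq_def, if_neg h1, if_pos h2]
      simp [h]
  | case4 acc w0 c rest h1 h2 ih =>
      rw [row_gen_altLoop, if_neg h1, if_neg h2, ih]
      have h : row_gen w0 c = row_gen (w0 - 2) (PySem.Int.bor (c <<< (2:Nat)) 1) ++ row_gen (w0 - 3) (PySem.Int.bor (c <<< (3:Nat)) 1) := by
        rw [row_gen.eq_def, if_neg h1, if_neg h2]
      simp [h]

-- ===== VERDICT (by name: the statement is the Claim_ definition above) =====
theorem row_gen_spec : Claim_equal_row_gen := by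
  intro w current _ _
  unfold Spec_row_gen row_gen_alt
  rw [row_gen_altLoop_spec]
  simp
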